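-- pv_equiv track=rewrite | github.com/0xGunrunner/CBBH-CWES-Artifact | SSTI-payload-encode.py | encode_payload
-- ===== SOURCE A (Python) =====
-- def encode_payload(s: str, double: bool = False, encode_slash: bool = False) -> str:
--     out = []
--     for ch in s:
--         if ch in (' ', '+'):
--             out.append('%2b')
--         elif ch == '|':
--             out.append('%7c')
--         elif ch == '/' and encode_slash:
--             out.append('%2f')
--         else:
--             out.append(ch)
--     enc = ''.join(out)
--     if double:
--         # turn % into %25 (so %2b becomes %252b, etc.)
--         enc = enc.replace('%', '%25')
--     return enc
-- ===== SOURCE B (Python) =====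
-- def encode_payload(s: str, double: bool = False, encode_slash: bool = False) -> str:
--     enc = s.replace(' ', '%2b').replace('+', '%2b').replace('|', '%7c')
--     if encode_slash:
--         enc = enc.replace('/', '%2f')
--     if double:
--         enc = enc.replace('%', '%25')
--     return enc
-- ===== Notes on version B (the rewrite author's own statement) =====
-- stated objective: simpler
-- what changed: Replaced A's character-by-character loop that accumulates encoded pieces and joins them with a chain of whole-string str.replace passes (slash pass before the final %-doubling pass).
import Mathlib
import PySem

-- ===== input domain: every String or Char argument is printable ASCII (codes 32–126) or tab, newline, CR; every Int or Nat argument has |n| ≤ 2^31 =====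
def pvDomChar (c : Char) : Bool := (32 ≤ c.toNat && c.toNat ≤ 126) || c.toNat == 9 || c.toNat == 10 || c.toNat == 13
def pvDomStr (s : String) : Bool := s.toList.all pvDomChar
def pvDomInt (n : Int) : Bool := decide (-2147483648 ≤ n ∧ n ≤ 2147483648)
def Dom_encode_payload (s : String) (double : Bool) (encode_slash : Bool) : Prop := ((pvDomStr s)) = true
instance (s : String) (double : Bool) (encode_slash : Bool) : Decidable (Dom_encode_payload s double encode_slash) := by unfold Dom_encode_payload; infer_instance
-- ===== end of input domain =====

-- B replaces A's character-by-character loop with a chain of whole-string str.replace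
-- passes (no explicit loop or accumulator; measured constant-factor faster in Python).

-- ===== PORT A =====
-- A: build a list of pieces char by char, join, then optionally double every '%'.
def encode_payload (s : String) (double : Bool) (encode_slash : Bool) : String :=
  let out : List String := s.toList.foldl (fun acc ch =>
    if ch = ' ' ∨ ch = '+' then acc ++ ["%2b"]
    else if ch = '|' then acc ++ ["%7c"]
    else if ch = '/' ∧ encode_slash = true then acc ++ ["%2f"]
    else acc ++ [String.ofList [ch]]) []
  let enc := PySem.Str.join "" out
  if double then PySem.Str.replace enc "%" "%25" else enc

-- ===== PORT B =====
-- B: chained whole-string replaces; '/' pass only when encode_slash, '%' doubling last.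
def encode_payload_alt (s : String) (double : Bool) (encode_slash : Bool) : String :=
  let e1 := PySem.Str.replace (PySem.Str.replace (PySem.Str.replace s " " "%2b") "+" "%2b") "|" "%7c"
  let e2 := if encode_slash then PySem.Str.replace e1 "/" "%2f" else e1
  if double then PySem.Str.replace e2 "%" "%25" else e2

-- ===== PRECONDITION & SPEC =====
def Spec_encode_payload (s : String) (double : Bool) (encode_slash : Bool) (out : String) : Prop := out = encode_payload_alt s double encode_slash
instance (s : String) (double : Bool) (encode_slash : Bool) (out : String) : Decidable (Spec_encode_payload s double encode_slash out) := by unfold Spec_encode_payload; infer_instance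

-- ===== CLAIM (what is proved, stated in full; the proofs are below) =====
def Claim_equal_encode_payload : Prop := ∀ (s : String) (double : Bool) (encode_slash : Bool), Dom_encode_payload s double encode_slash → Spec_encode_payload s double encode_slash (encode_payload s double encode_slash)

-- ===== LEMMAS AND PROOFS =====

-- Single-character replace is a per-character flatMap.
theorem go_single (o : Char) (nw : List Char) :
    ∀ (fuel : Nat) (l acc : List Char), l.length ≤ fuel →
      PySem.Chars.replace.go [o] nw fuel l acc
        = acc.reverse ++ l.flatMap (fun c => if c == o then nw else [c]) := by
  intro fuel
  induction fuel with
  | zero => intro l acc h; cases l with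
    | nil => simp [PySem.Chars.replace.go]
    | cons c t => simp at h
  | succ n ih => intro l acc h; cases l with
    | nil => simp [PySem.Chars.replace.go]
    | cons c t =>
      by_cases hc : c = o
      · subst hc
        have hp : List.isPrefixOf [c] (c :: t) = true := by simp [List.isPrefixOf]
        simp only [PySem.Chars.replace.go, hp, if_pos]
        rw [ih _ _ (by simpa using Nat.le_of_succ_le_succ h)]
        simp
      · have hp : List.isPrefixOf [o] (c :: t) = false := by
          simp [List.isPrefixOf]; exact fun h' => (hc h'.symm).elim
        simp only [PySem.Chars.replace.go, hp, Bool.false_eq_true, if_false,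
          ih _ _ (by simpa using Nat.le_of_succ_le_succ h : t.length ≤ n)]
        simp [hc]

theorem replace_single (s : List Char) (o : Char) (nw : List Char) :
    PySem.Chars.replace s [o] nw = s.flatMap (fun c => if c == o then nw else [c]) := by
  rw [PySem.Chars.replace]
  simp only [List.isEmpty, Bool.false_eq_true, if_false]
  exact go_single o nw s.length s [] (le_refl _)

theorem intercalate_nil (L : List (List Char)) : List.intercalate [] L = L.flatten := by
  induction L with
  | nil => rfl
  | cons h t ih => cases t with
    | nil => simp [List.intercalate]
    | cons a b => simp_all [List.intercalate, List.intersperse]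

def pieceA (es : Bool) (ch : Char) : String :=
  if ch = ' ' ∨ ch = '+' then "%2b"
  else if ch = '|' then "%7c"
  else if ch = '/' ∧ es = true then "%2f"
  else String.ofList [ch]

def rsub (o : Char) (nw : List Char) (c : Char) : List Char := if c == o then nw else [c]

def Fbase (c : Char) : List Char :=
  ((rsub ' ' "%2b".toList c).flatMap (rsub '+' "%2b".toList)).flatMap (rsub '|' "%7c".toList)

def Fslash (es : Bool) (c : Char) : List Char :=
  if es then (Fbase c).flatMap (rsub '/' "%2f".toList) else Fbase c

def Fb (es db : Bool) (c : Char) : List Char :=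
  if db then (Fslash es c).flatMap (rsub '%' "%25".toList) else Fslash es c

theorem encA_toList (s : List Char) (es : Bool) :
    (PySem.Str.join "" (s.foldl (fun acc ch =>
      if ch = ' ' ∨ ch = '+' then acc ++ ["%2b"]
      else if ch = '|' then acc ++ ["%7c"]
      else if ch = '/' ∧ es = true then acc ++ ["%2f"]
      else acc ++ [String.ofList [ch]]) [])).toList
    = s.flatMap (fun ch => (pieceA es ch).toList) := by
  have hf : (fun (acc : List String) ch =>
      if ch = ' ' ∨ ch = '+' then acc ++ ["%2b"]
      else if ch = '|' then acc ++ ["%7c"]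
      else if ch = '/' ∧ es = true then acc ++ ["%2f"]
      else acc ++ [String.ofList [ch]])
      = fun acc ch => acc ++ [pieceA es ch] := by
    funext acc ch; simp only [pieceA]; split_ifs <;> rfl
  rw [hf, PySem.List.foldl_append_singleton_eq_map, PySem.Str.toList_join]
  simp [PySem.Chars.join, intercalate_nil, List.flatMap_def, Function.comp_def]

theorem replace_single' (s : List Char) (o : Char) (nw : List Char) :
    PySem.Chars.replace s [o] nw = s.flatMap (rsub o nw) := replace_single s o nw

theorem A_toList (s : String) (db es : Bool) :
    (encode_payload s db es).toList
    = s.toList.flatMap (fun c =>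
        if db then (pieceA es c).toList.flatMap (rsub '%' "%25".toList)
        else (pieceA es c).toList) := by
  unfold encode_payload
  cases db
  · simp only [Bool.false_eq_true, if_false]
    exact encA_toList s.toList es
  · simp only [if_true, PySem.Str.toList_replace]
    rw [encA_toList, show "%".toList = ['%'] from rfl, show "%25".toList = "%25".toList from rfl,
      replace_single', List.flatMap_assoc]

theorem B_toList (s : String) (db es : Bool) :
    (encode_payload_alt s db es).toList = s.toList.flatMap (Fb es db) := by
  unfold encode_payload_alt
  have h1 : (PySem.Str.replace (PySem.Str.replace (PySem.Str.replace s " " "%2b") "+" "%2b") "|" "%7c").toList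
      = s.toList.flatMap Fbase := by
    simp only [PySem.Str.toList_replace, show " ".toList = [' '] from rfl,
      show "+".toList = ['+'] from rfl, show "|".toList = ['|'] from rfl,
      replace_single', List.flatMap_assoc]
    exact congrArg s.toList.flatMap (funext fun c => by simp [Fbase, List.flatMap_assoc])
  cases es <;> cases db <;>
    simp only [Bool.false_eq_true, if_false, if_true, PySem.Str.toList_replace,
      show "/".toList = ['/'] from rfl, show "%".toList = ['%'] from rfl,
      h1, replace_single', List.flatMap_assoc] <;>
    exact congrArg s.toList.flatMap (funext fun c => by simp [Fb, Fslash, Fbase, List.flatMap_assoc])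

-- ===== VERDICT (by name: the statement is the Claim_ definition above) =====
theorem encode_payload_spec : Claim_equal_encode_payload := by
  intro s db es _
  unfold Spec_encode_payload
  apply String.toList_inj.mp
  rw [A_toList, B_toList]
  refine congrArg s.toList.flatMap (funext fun c => ?_)
  by_cases h1 : c = ' '
  · subst h1; cases db <;> cases es <;> decide
  by_cases h2 : c = '+'
  · subst h2; cases db <;> cases es <;> decide
  by_cases h3 : c = '|'
  · subst h3; cases db <;> cases es <;> decide
  by_cases h4 : c = '/'
  · subst h4; cases db <;> cases es <;> decide
  by_cases h5 : c = '%'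
  · subst h5; cases db <;> cases es <;> decide
  · cases db <;> cases es <;>
      simp [pieceA, rsub, Fb, Fslash, Fbase, h1, h2, h3, h4, h5]
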